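-- pv_equiv track=rewrite | github.com/rajlath/rkl_codes | HackerEarth/crazy_matrix.py | dfs
-- ===== SOURCE A (Python) =====
-- def dfs(matrix, i, j, flag,size, visited):
--     if i < 0 or j < 0 or i >=size or j >= size:
--         return False
--     if matrix[i][j] != flag or visited[i][j]:
--         return False
--     if i == size -1 and  flag == 1:return True
--     if j == size -1 and  flag == 2:return True
--     visited[i][j] = True
--     if (dfs(matrix, i-1, j-1, flag, size, visited)): return True
--     if (dfs(matrix, i, j-1, flag, size, visited))  : return True
--     if(dfs(matrix, i+1, j-1, flag, size, visited)) :return True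
--     if(dfs(matrix, i+1, j, flag, size, visited)) :return True
--     if(dfs(matrix, i+1, j+1, flag, size, visited)): return True
--     if(dfs(matrix, i, j+1, flag, size, visited)) :return True
--     if(dfs(matrix, i-1, j+1, flag, size, visited)):return True
--     return False
-- ===== SOURCE B (Python) =====
-- def dfs(matrix, i, j, flag, size, visited):
--     stack = [(i, j)]
--     while stack:
--         i, j = stack.pop()
--         if i < 0 or j < 0 or i >= size or j >= size:
--             continue
--         if matrix[i][j] != flag or visited[i][j]:
--             continue
--         if i == size - 1 and flag == 1:
--             return True
--         if j == size - 1 and flag == 2: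
--             return True
--         visited[i][j] = True
--         stack.extend([(i - 1, j + 1), (i, j + 1), (i + 1, j + 1),
--                       (i + 1, j), (i + 1, j - 1), (i, j - 1), (i - 1, j - 1)])
--     return False
-- ===== Notes on version B (the rewrite author's own statement) =====
-- stated objective: alternative
-- what changed: The recursive 7-way DFS is replaced by an iterative loop over an explicit stack (neighbors pushed in reverse so they pop in the same order), removing recursion entirely; Pre_ excludes starts inside the grid whose matrix/visited rows do not cover the size-by-size grid, where Python's indexing in general raises IndexError (a few such inputs happen to return before a missing cell is indexed, and A and B agree there).
-- outside the precondition, e.g. on dfs([[1, 1], [1, 1]], 0, 0, 1, 2, [[True, True]]): A returns False, B returns False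
import Mathlib
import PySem

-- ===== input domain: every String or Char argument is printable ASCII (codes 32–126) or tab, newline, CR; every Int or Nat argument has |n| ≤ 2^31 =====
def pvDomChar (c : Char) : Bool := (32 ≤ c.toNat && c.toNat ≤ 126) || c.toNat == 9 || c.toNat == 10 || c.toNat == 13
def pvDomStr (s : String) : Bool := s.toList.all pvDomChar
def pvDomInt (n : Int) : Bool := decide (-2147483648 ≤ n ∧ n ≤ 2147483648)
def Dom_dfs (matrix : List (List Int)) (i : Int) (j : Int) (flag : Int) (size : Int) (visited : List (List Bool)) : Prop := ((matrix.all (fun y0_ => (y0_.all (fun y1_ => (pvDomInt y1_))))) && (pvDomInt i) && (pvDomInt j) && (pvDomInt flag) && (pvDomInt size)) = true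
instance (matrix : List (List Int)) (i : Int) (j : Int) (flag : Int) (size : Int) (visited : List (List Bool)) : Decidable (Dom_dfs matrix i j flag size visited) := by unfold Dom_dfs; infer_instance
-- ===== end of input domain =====

-- B replaces A's 7-way recursive DFS by an iterative loop over an explicit stack (same guard
-- order, neighbors pushed in reverse so they pop in A's call order); both Pythons mutate
-- `visited` identically in place, and the equivalence proved here is about the return value.

-- shared primitive helpers (2-D indexing / assignment, exact Python semantics via PySem;
-- `none` = IndexError, which Pre_dfs puts outside the claim)
def pvGet2I (m : List (List Int)) (i j : Int) : Option Int :=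
  match PySem.List.pyGet? m i with
  | none => none
  | some row => PySem.List.pyGet? row j

def pvGet2B (v : List (List Bool)) (i j : Int) : Option Bool :=
  match PySem.List.pyGet? v i with
  | none => none
  | some row => PySem.List.pyGet? row j

-- visited[i][j] = True (only reached with 0 ≤ i,j; out-of-range is outside Pre_dfs)
def pvSet2 (v : List (List Bool)) (i j : Int) : List (List Bool) :=
  PySem.List.pySetD v i (PySem.List.pySetD (PySem.List.pyGetD v i []) j true)

-- number of unvisited cells: the termination measure of both ports
def pvMu (v : List (List Bool)) : Nat := (v.map (fun row => row.count false)).sum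

-- termination lemmas (cited by the ports' decreasing_by, so they live above the ports)
theorem pvCount_set_true_lt : ∀ (row : List Bool) (k : Nat), row[k]? = some false →
    (row.set k true).count false < row.count false := by
  intro row
  induction row with
  | nil => intro k h; simp at h
  | cons a rest ih =>
    intro k h
    cases k with
    | zero =>
      simp at h
      subst h
      simp [List.count_cons]
    | succ k =>
      simp at h
      have := ih k h
      cases a <;> simp [List.count_cons] <;> omega

theorem pvMu_set_row_lt : ∀ (v : List (List Bool)) (n : Nat) (r' row : List Bool),
    v[n]? = some row → r'.count false < row.count false →
    pvMu (v.set n r') < pvMu v := by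
  intro v
  induction v with
  | nil => intro n r' row h; simp at h
  | cons a rest ih =>
    intro n r' row h hlt
    cases n with
    | zero =>
      simp at h
      subst h
      simp [pvMu]
      omega
    | succ n =>
      simp at h
      have := ih n r' row h hlt
      simp [pvMu] at this ⊢
      omega

theorem pvMu_set_lt (v : List (List Bool)) (i j : Int) (hi : 0 ≤ i) (hj : 0 ≤ j)
    (h : pvGet2B v i j = some false) : pvMu (pvSet2 v i j) < pvMu v := by
  unfold pvGet2B at h
  cases hg : PySem.List.pyGet? v i with
  | none => rw [hg] at h; simp at h
  | some row =>
    rw [hg] at h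
    simp only at h
    have hrow' : v[i.toNat]? = some row := by
      rw [← PySem.List.pyGet?_of_nonneg v hi]; exact hg
    have hcell : row[j.toNat]? = some false := by
      rw [← PySem.List.pyGet?_of_nonneg row hj]; exact h
    obtain ⟨hilen, hval⟩ := List.getElem?_eq_some_iff.mp hrow'
    have hgetD : PySem.List.pyGetD v i [] = row := by
      rw [PySem.List.pyGetD_eq_getElem v [] hi (by omega)]
      exact hval
    unfold pvSet2
    rw [PySem.List.pySetD_of_nonneg v _ hi, hgetD, PySem.List.pySetD_of_nonneg row true hj]
    exact pvMu_set_row_lt v i.toNat _ row hrow' (pvCount_set_true_lt row j.toNat hcell)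

-- ===== PORT A =====
-- literal port of A's recursive DFS; the state `v` (Python's mutated `visited`) is threaded
-- through, each result carries pvMu-monotonicity so the recursion is well-founded
def dfsW (matrix : List (List Int)) (flag size : Int) (v : List (List Bool)) (i j : Int) :
    {p : Bool × List (List Bool) // pvMu p.2 ≤ pvMu v} :=
  if h1 : i < 0 ∨ j < 0 ∨ size ≤ i ∨ size ≤ j then ⟨(false, v), le_rfl⟩
  else if h2 : pvGet2I matrix i j ≠ some flag ∨ pvGet2B v i j ≠ some false then ⟨(false, v), le_rfl⟩
  else if i = size - 1 ∧ flag = 1 then ⟨(true, v), le_rfl⟩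
  else if j = size - 1 ∧ flag = 2 then ⟨(true, v), le_rfl⟩
  else
    have hlt : pvMu (pvSet2 v i j) < pvMu v := by
      push_neg at h1 h2
      exact pvMu_set_lt v i j (by omega) (by omega) h2.2
    match dfsW matrix flag size (pvSet2 v i j) (i-1) (j-1) with
    | ⟨(true, w), hw⟩ => ⟨(true, w), hw.trans hlt.le⟩
    | ⟨(false, w1), hw1⟩ =>
    match dfsW matrix flag size w1 i (j-1) with
    | ⟨(true, w), hw⟩ => ⟨(true, w), (hw.trans hw1).trans hlt.le⟩
    | ⟨(false, w2), hw2⟩ =>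
    match dfsW matrix flag size w2 (i+1) (j-1) with
    | ⟨(true, w), hw⟩ => ⟨(true, w), ((hw.trans hw2).trans hw1).trans hlt.le⟩
    | ⟨(false, w3), hw3⟩ =>
    match dfsW matrix flag size w3 (i+1) j with
    | ⟨(true, w), hw⟩ => ⟨(true, w), (((hw.trans hw3).trans hw2).trans hw1).trans hlt.le⟩
    | ⟨(false, w4), hw4⟩ =>
    match dfsW matrix flag size w4 (i+1) (j+1) with
    | ⟨(true, w), hw⟩ => ⟨(true, w), ((((hw.trans hw4).trans hw3).trans hw2).trans hw1).trans hlt.le⟩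
    | ⟨(false, w5), hw5⟩ =>
    match dfsW matrix flag size w5 i (j+1) with
    | ⟨(true, w), hw⟩ => ⟨(true, w), (((((hw.trans hw5).trans hw4).trans hw3).trans hw2).trans hw1).trans hlt.le⟩
    | ⟨(false, w6), hw6⟩ =>
    match dfsW matrix flag size w6 (i-1) (j+1) with
    | ⟨(true, w), hw⟩ => ⟨(true, w), ((((((hw.trans hw6).trans hw5).trans hw4).trans hw3).trans hw2).trans hw1).trans hlt.le⟩
    | ⟨(false, w7), hw7⟩ => ⟨(false, w7), ((((((hw7.trans hw6).trans hw5).trans hw4).trans hw3).trans hw2).trans hw1).trans hlt.le⟩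
termination_by pvMu v
decreasing_by all_goals first | omega | (simp only [] at *; omega)

def dfs (matrix : List (List Int)) (i : Int) (j : Int) (flag : Int) (size : Int) (visited : List (List Bool)) : Bool :=
  (dfsW matrix flag size visited i j).1.1

-- ===== PORT B =====
-- literal port of B's stack loop: the Lean list's head is the Python stack's top (the list is
-- Python's stack reversed), so Python's `extend` of the 7 neighbors followed by `pop()`s from
-- the end is this cons-list in the reversed (= A's) order
def loopW (matrix : List (List Int)) (flag size : Int) (v : List (List Bool)) (st : List (Int × Int)) : Bool :=
  match st with
  | [] => false
  | (i, j) :: rest =>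
    if hg1 : i < 0 ∨ j < 0 ∨ size ≤ i ∨ size ≤ j then loopW matrix flag size v rest
    else if hg2 : pvGet2I matrix i j ≠ some flag ∨ pvGet2B v i j ≠ some false then loopW matrix flag size v rest
    else if i = size - 1 ∧ flag = 1 then true
    else if j = size - 1 ∧ flag = 2 then true
    else
      have hlt : pvMu (pvSet2 v i j) < pvMu v := by
        push_neg at hg1 hg2
        exact pvMu_set_lt v i j (by omega) (by omega) hg2.2
      loopW matrix flag size (pvSet2 v i j)
        ([(i-1,j-1), (i,j-1), (i+1,j-1), (i+1,j), (i+1,j+1), (i,j+1), (i-1,j+1)] ++ rest)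
termination_by (pvMu v, st.length)

def dfs_alt (matrix : List (List Int)) (i : Int) (j : Int) (flag : Int) (size : Int) (visited : List (List Bool)) : Bool :=
  loopW matrix flag size visited [(i, j)]

-- ===== PRECONDITION & SPEC =====
-- Pre_dfs excludes the inputs where Python's indexing may raise IndexError: a start cell inside
-- [0,size)² with a matrix/visited that does not cover the size×size grid; a few such inputs
-- happen to return before a missing cell is ever indexed, and A and B agree there
def Pre_dfs (matrix : List (List Int)) (i : Int) (j : Int) (flag : Int) (size : Int) (visited : List (List Bool)) : Prop :=
  (i < 0 ∨ j < 0 ∨ size ≤ i ∨ size ≤ j) ∨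
  (size ≤ (matrix.length : Int) ∧ size ≤ (visited.length : Int) ∧
   (∀ row ∈ matrix, size ≤ (row.length : Int)) ∧ (∀ row ∈ visited, size ≤ (row.length : Int)))
instance (matrix : List (List Int)) (i : Int) (j : Int) (flag : Int) (size : Int) (visited : List (List Bool)) : Decidable (Pre_dfs matrix i j flag size visited) := by unfold Pre_dfs; infer_instance

def pvWitness_dfs : List (List Int) × Int × Int × Int × Int × List (List Bool) :=
  ([[1, 2], [2, 1]], 0, 0, 1, 2, [[false, false], [false, false]])

def Spec_dfs (matrix : List (List Int)) (i : Int) (j : Int) (flag : Int) (size : Int) (visited : List (List Bool)) (out : Bool) : Prop := out = dfs_alt matrix i j flag size visited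
instance (matrix : List (List Int)) (i : Int) (j : Int) (flag : Int) (size : Int) (visited : List (List Bool)) (out : Bool) : Decidable (Spec_dfs matrix i j flag size visited out) := by unfold Spec_dfs; infer_instance

-- ===== CLAIM (what is proved, stated in full; the proofs are below) =====
def Claim_equal_dfs : Prop := ∀ (matrix : List (List Int)) (i : Int) (j : Int) (flag : Int) (size : Int) (visited : List (List Bool)), Dom_dfs matrix i j flag size visited → Pre_dfs matrix i j flag size visited → Spec_dfs matrix i j flag size visited (dfs matrix i j flag size visited)

-- ===== LEMMAS AND PROOFS =====

-- A's recursion, restated as sequential processing of a list of pending cells (proof device)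
def chainA (matrix : List (List Int)) (flag size : Int) : List (List Bool) → List (Int × Int) → Bool × List (List Bool)
  | v, [] => (false, v)
  | v, c :: cs =>
    match dfsW matrix flag size v c.1 c.2 with
    | ⟨(true, w), _⟩ => (true, w)
    | ⟨(false, w), _⟩ => chainA matrix flag size w cs

-- in its recursive case, dfsW is exactly chainA over the 7 neighbors (in A's call order)
theorem dfsW_eq_chain (matrix : List (List Int)) (flag size : Int) (v : List (List Bool)) (i j : Int)
    (h1 : ¬(i < 0 ∨ j < 0 ∨ size ≤ i ∨ size ≤ j))
    (h2 : ¬(pvGet2I matrix i j ≠ some flag ∨ pvGet2B v i j ≠ some false))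
    (h3 : ¬(i = size - 1 ∧ flag = 1)) (h4 : ¬(j = size - 1 ∧ flag = 2)) :
    (dfsW matrix flag size v i j).1 = chainA matrix flag size (pvSet2 v i j)
      [(i-1,j-1), (i,j-1), (i+1,j-1), (i+1,j), (i+1,j+1), (i,j+1), (i-1,j+1)] := by
  rw [dfsW, dif_neg h1, dif_neg h2, if_neg h3, if_neg h4]
  simp only []
  rcases hA1 : dfsW matrix flag size (pvSet2 v i j) (i-1) (j-1) with ⟨⟨b1, w1⟩, hp1⟩
  cases b1 with
  | true => simp [chainA, hA1]
  | false =>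
  simp only [chainA, hA1]
  rcases hA2 : dfsW matrix flag size w1 i (j-1) with ⟨⟨b2, w2⟩, hp2⟩
  cases b2 with
  | true => simp [chainA, hA2]
  | false =>
  simp only [chainA, hA2]
  rcases hA3 : dfsW matrix flag size w2 (i+1) (j-1) with ⟨⟨b3, w3⟩, hp3⟩
  cases b3 with
  | true => simp [chainA, hA3]
  | false =>
  simp only [chainA, hA3]
  rcases hA4 : dfsW matrix flag size w3 (i+1) j with ⟨⟨b4, w4⟩, hp4⟩
  cases b4 with
  | true => simp [chainA, hA4]
  | false =>
  simp only [chainA, hA4]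
  rcases hA5 : dfsW matrix flag size w4 (i+1) (j+1) with ⟨⟨b5, w5⟩, hp5⟩
  cases b5 with
  | true => simp [chainA, hA5]
  | false =>
  simp only [chainA, hA5]
  rcases hA6 : dfsW matrix flag size w5 i (j+1) with ⟨⟨b6, w6⟩, hp6⟩
  cases b6 with
  | true => simp [chainA, hA6]
  | false =>
  simp only [chainA, hA6]
  rcases hA7 : dfsW matrix flag size w6 (i-1) (j+1) with ⟨⟨b7, w7⟩, hp7⟩
  cases b7 with
  | true => simp [chainA, hA7]
  | false => simp [chainA, hA7]

-- B's loop processes a block of stacked cells exactly as A's sequential recursion does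
theorem seq_lemma (matrix : List (List Int)) (flag size : Int) (n : Nat)
    (IH : ∀ v, pvMu v ≤ n → ∀ i j st, loopW matrix flag size v ((i,j)::st) =
      (if (dfsW matrix flag size v i j).1.1 then true
       else loopW matrix flag size (dfsW matrix flag size v i j).1.2 st)) :
    ∀ cells (v : List (List Bool)) st, pvMu v ≤ n →
      loopW matrix flag size v (cells ++ st) =
        (if (chainA matrix flag size v cells).1 then true
         else loopW matrix flag size (chainA matrix flag size v cells).2 st) := by
  intro cells
  induction cells with
  | nil => intro v st hv; simp [chainA]
  | cons c cs ih =>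
    intro v st hv
    obtain ⟨ci, cj⟩ := c
    rw [List.cons_append, IH v hv ci cj (cs ++ st)]
    rcases hA : dfsW matrix flag size v ci cj with ⟨⟨b, w⟩, hp⟩
    simp only at hp
    cases b with
    | true => simp [chainA, hA]
    | false =>
      have hrhs : chainA matrix flag size v ((ci, cj) :: cs) = chainA matrix flag size w cs := by
        simp [chainA, hA]
      rw [hrhs, if_neg (by simp), ih w st (hp.trans hv)]

-- the heart: popping one cell off B's stack computes A's recursive call on that cell
theorem key_lemma (matrix : List (List Int)) (flag size : Int) : ∀ (n : Nat) (v : List (List Bool)), pvMu v ≤ n →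
    ∀ (i j : Int) (st : List (Int × Int)),
      loopW matrix flag size v ((i,j)::st) =
        (if (dfsW matrix flag size v i j).1.1 then true
         else loopW matrix flag size (dfsW matrix flag size v i j).1.2 st) := by
  intro n
  induction n with
  | zero =>
    intro v hv i j st
    by_cases h1 : (i < 0 ∨ j < 0 ∨ size ≤ i ∨ size ≤ j)
    · rw [loopW, dfsW]; simp [h1]
    by_cases h2 : (pvGet2I matrix i j ≠ some flag ∨ pvGet2B v i j ≠ some false)
    · rw [loopW, dfsW]; simp [h1, h2]
    · have hlt : pvMu (pvSet2 v i j) < pvMu v := by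
        push_neg at h1 h2
        exact pvMu_set_lt v i j (by omega) (by omega) h2.2
      omega
  | succ n ihn =>
    intro v hv i j st
    by_cases h1 : (i < 0 ∨ j < 0 ∨ size ≤ i ∨ size ≤ j)
    · rw [loopW, dfsW]; simp [h1]
    by_cases h2 : (pvGet2I matrix i j ≠ some flag ∨ pvGet2B v i j ≠ some false)
    · rw [loopW, dfsW]; simp [h1, h2]
    by_cases h3 : (i = size - 1 ∧ flag = 1)
    · rw [loopW, dif_neg h1, dif_neg h2, if_pos h3, dfsW, dif_neg h1, dif_neg h2, if_pos h3]
      simp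
    by_cases h4 : (j = size - 1 ∧ flag = 2)
    · rw [loopW, dif_neg h1, dif_neg h2, if_neg h3, if_pos h4,
          dfsW, dif_neg h1, dif_neg h2, if_neg h3, if_pos h4]
      simp
    · have hlt : pvMu (pvSet2 v i j) < pvMu v := by
        push_neg at h1 h2
        exact pvMu_set_lt v i j (by omega) (by omega) h2.2
      have hv1 : pvMu (pvSet2 v i j) ≤ n := by omega
      rw [loopW, dif_neg h1, dif_neg h2, if_neg h3, if_neg h4]
      rw [seq_lemma matrix flag size n ihn
            [(i-1,j-1), (i,j-1), (i+1,j-1), (i+1,j), (i+1,j+1), (i,j+1), (i-1,j+1)]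
            (pvSet2 v i j) st hv1,
          dfsW_eq_chain matrix flag size v i j h1 h2 h3 h4]

-- ===== VERDICT (by name: the statement is the Claim_ definition above) =====
theorem dfs_spec : Claim_equal_dfs := by
  intro matrix i j flag size visited _ _
  unfold Spec_dfs dfs dfs_alt
  rw [show ([(i, j)] : List (Int × Int)) = (i, j) :: [] from rfl,
      key_lemma matrix flag size (pvMu visited) visited le_rfl i j []]
  cases hb : (dfsW matrix flag size visited i j).1.1 with
  | false => simp [loopW]
  | true => simp
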